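-- pv_equiv track=rewrite | github.com/nogafriedman/nonogram | nonogram.py | intersection_row
-- ===== SOURCE A (Python) =====
-- def intersection_row(rows):  # 3
--     """
--     gets various rows and returns the constraints they have in common
--     :param rows: list of lists, each sub-list is a row, all with the same length
--     :return: a list with the common constraints (1, -1 or 0)
--     """
--     intersection_list = []
--     if len(rows) == 0:
--         return intersection_list
--     for i in range(len(rows[0])):
--         same_num = True
--         for r in range(len(rows)):
--             if rows[r][i] != rows[0][i]:
--                 same_num = False
--         if same_num:
--             intersection_list.append(rows[0][i])
--         else:
--             intersection_list.append(-1)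
--     if intersection_list == []:
--         return []
--     else:
--         return intersection_list
-- ===== SOURCE B (Python) =====
-- def intersection_row(rows):
--     if not rows:
--         return []
--     acc = list(rows[0])
--     for row in rows[1:]:
--         acc = [x if x == y else -1 for x, y in zip(acc, row)]
--     return acc
-- ===== Notes on version B (the rewrite author's own statement) =====
-- stated objective: simpler
-- what changed: B is a pairwise reduce: it repeatedly merges the running accumulator with the next row via zip (keep a value if it equals the next row's entry, else -1), never comparing against rows[0] and never indexing; correct because -1 is absorbing under the merge. Pre_ excludes inputs where some row is shorter than rows[0], on which Python A raises IndexError.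
import Mathlib
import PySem

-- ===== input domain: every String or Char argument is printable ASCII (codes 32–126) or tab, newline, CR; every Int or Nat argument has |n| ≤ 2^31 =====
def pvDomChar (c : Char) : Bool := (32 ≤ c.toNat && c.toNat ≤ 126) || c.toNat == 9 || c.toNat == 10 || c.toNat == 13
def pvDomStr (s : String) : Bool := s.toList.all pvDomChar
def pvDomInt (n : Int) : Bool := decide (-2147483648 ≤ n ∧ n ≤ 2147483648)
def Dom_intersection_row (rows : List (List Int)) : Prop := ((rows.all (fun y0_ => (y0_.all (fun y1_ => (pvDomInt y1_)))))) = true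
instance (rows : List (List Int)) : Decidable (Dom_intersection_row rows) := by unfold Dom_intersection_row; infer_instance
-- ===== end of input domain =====

-- B is a pairwise reduce: merge the accumulator with each next row via zip
-- (keep a value iff it equals the next row's entry, else -1); same return value on Pre_.

-- ===== PORT A =====
-- rows[r][i] is ported as List.getD _ i 0: under Pre_ every access is in range,
-- so the default 0 is never used and the port is exact where Python A returns.
def intersection_row (rows : List (List Int)) : List Int :=
  match rows with
  | [] => []
  | r0 :: rest =>
    let lst := (List.range r0.length).foldl (fun acc i =>
      let same := (r0 :: rest).foldl
        (fun s r => if r.getD i 0 ≠ r0.getD i 0 then false else s) true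
      acc ++ [if same then r0.getD i 0 else -1]) []
    if lst = [] then [] else lst

-- ===== PORT B =====
-- acc = list(rows[0]); acc = [x if x == y else -1 for x, y in zip(acc, row)] per remaining row.
def intersection_row_alt (rows : List (List Int)) : List Int :=
  match rows with
  | [] => []
  | r0 :: rest =>
    rest.foldl (fun acc row =>
      (acc.zip row).map (fun p => if p.1 = p.2 then p.1 else -1)) r0

-- ===== PRECONDITION & SPEC =====
-- Pre_ excludes inputs where some row is shorter than rows[0]: there Python A raises IndexError.
def Pre_intersection_row (rows : List (List Int)) : Prop :=
  ∀ r ∈ rows, (rows.headD []).length ≤ r.length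
instance (rows : List (List Int)) : Decidable (Pre_intersection_row rows) := by
  unfold Pre_intersection_row; infer_instance

def pvWitness_intersection_row : List (List Int) := [[1, 0, -1], [1, 2, -1]]

def Spec_intersection_row (rows : List (List Int)) (out : List Int) : Prop := out = intersection_row_alt rows
instance (rows : List (List Int)) (out : List Int) : Decidable (Spec_intersection_row rows out) := by unfold Spec_intersection_row; infer_instance

-- ===== CLAIM (what is proved, stated in full; the proofs are below) =====
def Claim_equal_intersection_row : Prop := ∀ (rows : List (List Int)), Dom_intersection_row rows → Pre_intersection_row rows → Spec_intersection_row rows (intersection_row rows)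

-- ===== LEMMAS AND PROOFS =====

-- the common per-column value
def pvColVal (r0 : List Int) (rest : List (List Int)) (i : Nat) : Int :=
  if rest.all (fun r => r.getD i 0 == r0.getD i 0) then r0.getD i 0 else -1

-- the scalar merge of one column entry with the rows of l
def pvScalar (i : Nat) (l : List (List Int)) (v : Int) : Int :=
  l.foldl (fun v r => if v = r.getD i 0 then v else -1) v

-- A's boolean-flag inner fold is an all-check
lemma pvFlagFold (r0 : List Int) (i : Nat) :
    ∀ (l : List (List Int)) (b : Bool),
      l.foldl (fun s r => if r.getD i 0 ≠ r0.getD i 0 then false else s) b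
        = (b && l.all (fun r => r.getD i 0 == r0.getD i 0)) := by
  intro l
  induction l with
  | nil => simp
  | cons r l ih =>
    intro b
    rw [List.foldl_cons, ih]
    by_cases h : r.getD i 0 = r0.getD i 0 <;>
      simp only [List.getD_eq_getElem?_getD] at h <;>
      simp [h]

-- a list is the map of its getD over its index range
lemma pvSelf_map (r0 : List Int) :
    r0 = (List.range r0.length).map (fun i => r0.getD i 0) := by
  apply List.ext_getElem
  · simp
  · intro j h1 h2
    simp only [List.getElem_map, List.getElem_range]
    exact (List.getD_eq_getElem r0 0 h1).symm

-- A computes the per-column common value, columnwise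
lemma pvA_map (r0 : List Int) (rest : List (List Int)) :
    intersection_row (r0 :: rest) = (List.range r0.length).map (pvColVal r0 rest) := by
  unfold intersection_row
  simp only
  rw [PySem.List.foldl_append_singleton_eq_map]
  have hmap : ((List.range r0.length).map (fun i =>
      if (r0 :: rest).foldl (fun s r => if r.getD i 0 ≠ r0.getD i 0 then false else s) true = true
      then r0.getD i 0 else -1)) = (List.range r0.length).map (pvColVal r0 rest) := by
    apply List.map_congr_left
    intro i _
    rw [pvFlagFold r0 i (r0 :: rest) true]
    simp [pvColVal]
  rw [hmap]
  split
  · rename_i hnil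
    simp only [List.nil_append] at hnil
    rw [hnil]
  · simp

-- one merge step on a map-over-range accumulator, columnwise
lemma pvMerge_map (row : List Int) (n : Nat) (g : Nat → Int) (h : n ≤ row.length) :
    (((List.range n).map g).zip row).map (fun p => if p.1 = p.2 then p.1 else -1)
      = (List.range n).map (fun i => if g i = row.getD i 0 then g i else -1) := by
  apply List.ext_getElem
  · simp; omega
  · intro j h1 h2
    simp only [List.length_map, List.length_zip, List.length_range] at h1
    have hj : j < n := by omega
    have hjr : j < row.length := by omega
    simp [List.getElem_zip, List.getD_eq_getElem?_getD, List.getElem?_eq_getElem hjr]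

-- B's fold acts columnwise on a map-over-range accumulator
lemma pvFold_map (n : Nat) :
    ∀ (rest : List (List Int)), (∀ r ∈ rest, n ≤ r.length) → ∀ (g : Nat → Int),
      rest.foldl (fun acc row =>
          (acc.zip row).map (fun p => if p.1 = p.2 then p.1 else -1))
        ((List.range n).map g)
        = (List.range n).map (fun i => pvScalar i rest (g i)) := by
  intro rest
  induction rest with
  | nil => intro _ g; simp [pvScalar]
  | cons row rest ih =>
    intro hlen g
    rw [List.foldl_cons, pvMerge_map row n g (hlen row (by simp)),
        ih (fun r hr => hlen r (by simp [hr])) (fun i => if g i = row.getD i 0 then g i else -1)]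
    apply List.map_congr_left
    intro i _
    simp [pvScalar]

-- -1 is absorbing under the scalar merge
lemma pvScalar_neg (i : Nat) : ∀ (l : List (List Int)), pvScalar i l (-1) = -1 := by
  intro l
  induction l with
  | nil => rfl
  | cons r l ih =>
    unfold pvScalar at *
    rw [List.foldl_cons]
    split <;> exact ih

-- the scalar merge starting at r0's entry is the per-column common value
lemma pvScalar_col (r0 : List Int) (i : Nat) :
    ∀ (rest : List (List Int)), pvScalar i rest (r0.getD i 0) = pvColVal r0 rest i := by
  intro rest
  induction rest with
  | nil => simp [pvScalar, pvColVal]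
  | cons r rest ih =>
    show List.foldl _ _ (r :: rest) = _
    rw [List.foldl_cons]
    by_cases h : r0.getD i 0 = r.getD i 0
    · rw [if_pos h]
      simp only [List.getD_eq_getElem?_getD] at h
      exact ih.trans (by simp [pvColVal, List.all_cons, h.symm])
    · rw [if_neg h]
      simp only [List.getD_eq_getElem?_getD] at h
      have hne : ¬ (r[i]?.getD 0 = r0[i]?.getD 0) := fun e => h e.symm
      exact (pvScalar_neg i rest).trans (by simp [pvColVal, List.all_cons, hne])

-- B computes the same map
lemma pvB_map (r0 : List Int) (rest : List (List Int))
    (hlen : ∀ r ∈ rest, r0.length ≤ r.length) :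
    intersection_row_alt (r0 :: rest) = (List.range r0.length).map (pvColVal r0 rest) := by
  unfold intersection_row_alt
  simp only
  have h := pvFold_map r0.length rest hlen (fun i => r0.getD i 0)
  rw [← pvSelf_map r0] at h
  rw [h]
  apply List.map_congr_left
  intro i _
  exact pvScalar_col r0 i rest

-- ===== VERDICT (by name: the statement is the Claim_ definition above) =====
theorem intersection_row_spec : Claim_equal_intersection_row := by
  intro rows _ hpre
  unfold Spec_intersection_row
  match rows with
  | [] => rfl
  | r0 :: rest =>
    rw [pvA_map, pvB_map r0 rest (fun r hr => hpre r (by simp [hr]))]
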